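-- pv_equiv track=rewrite | github.com/longxuan0201/Enterprise-Support-Agent | app/retrieval/ingest_pipeline.py | find_chunk_end_boundary
-- ===== SOURCE A (Python) =====
-- def find_chunk_end_boundary(text: str, start:int, end:int) -> int:
--     """Find the boundaries of the chunks in the text."""
--     boundaries_candidates = ["\n",".",",","!", "?", ";", ":", " "]
--     search_window=text[start:end]
--     best_boundary = -1
--     for marker in boundaries_candidates:
--         pos = search_window.rfind(marker)
--         if pos > best_boundary:
--             best_boundary = pos
--     if best_boundary == -1:
--         return end
--     adjusted_end=start + best_boundary + 1
--
--     if adjusted_end - start < 100: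
--             return end
--     return adjusted_end
-- ===== SOURCE B (Python) =====
-- def find_chunk_end_boundary(text: str, start: int, end: int) -> int:
--     """Find the boundaries of the chunks in the text."""
--     boundary_chars = {"\n", ".", ",", "!", "?", ";", ":", " "}
--     window = text[start:end]
--     for i in range(len(window) - 1, -1, -1):
--         if window[i] in boundary_chars:
--             adjusted_end = start + i + 1
--             return end if adjusted_end - start < 100 else adjusted_end
--     return end
-- ===== Notes on version B (the rewrite author's own statement) =====
-- stated objective: alternative
-- what changed: Replaces the eight separate rfind passes (one per boundary marker, keeping the max) by a single reverse scan over the window that stops at the first character belonging to the marker set.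
import Mathlib
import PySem

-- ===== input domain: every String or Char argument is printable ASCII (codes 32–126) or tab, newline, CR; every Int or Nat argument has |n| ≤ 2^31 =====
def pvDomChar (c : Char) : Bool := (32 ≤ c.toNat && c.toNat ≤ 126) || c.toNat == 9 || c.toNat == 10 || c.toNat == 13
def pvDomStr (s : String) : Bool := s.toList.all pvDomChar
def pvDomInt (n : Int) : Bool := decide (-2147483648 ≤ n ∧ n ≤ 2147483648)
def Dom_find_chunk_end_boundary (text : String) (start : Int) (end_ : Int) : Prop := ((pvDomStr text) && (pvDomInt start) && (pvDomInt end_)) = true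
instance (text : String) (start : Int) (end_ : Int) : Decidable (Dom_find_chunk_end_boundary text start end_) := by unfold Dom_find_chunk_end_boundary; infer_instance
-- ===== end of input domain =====

-- B replaces A's eight per-marker rfind passes by one reverse scan of the window with early exit (objective: alternative algorithm, same cost).

-- ===== PORT A =====
-- literal transliteration of A: window = text[start:end]; fold over the eight markers keeping the best rfind; then the boundary logic
def find_chunk_end_boundary (text : String) (start : Int) (end_ : Int) : Int :=
  let boundaries_candidates : List (List Char) := [['\n'], ['.'], [','], ['!'], ['?'], [';'], [':'], [' ']]
  let search_window := PySem.List.slice text.toList (some start) (some end_)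
  let best_boundary := boundaries_candidates.foldl
    (fun best marker =>
      let pos := PySem.Chars.rfind search_window marker
      if pos > best then pos else best) (-1)
  if best_boundary = -1 then end_
  else
    let adjusted_end := start + best_boundary + 1
    if adjusted_end - start < 100 then end_
    else adjusted_end

-- ===== PORT B =====
def pvBoundarySet : PySem.Set Char := PySem.Set.ofList ['\n', '.', ',', '!', '?', ';', ':', ' ']

-- B's loop 'for i in range(len(window)-1, -1, -1): if window[i] in boundary_chars: …':
-- iterating window[i] with i counting down is exactly the traversal of window.reverse with the counter i
def fceb_scan (start end_ : Int) : List Char → Int → Int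
  | [], _ => end_
  | c :: rest, i =>
      if PySem.Set.contains pvBoundarySet c then
        let adjusted_end := start + i + 1
        if adjusted_end - start < 100 then end_ else adjusted_end
      else fceb_scan start end_ rest (i - 1)

def find_chunk_end_boundary_alt (text : String) (start : Int) (end_ : Int) : Int :=
  let window := PySem.List.slice text.toList (some start) (some end_)
  fceb_scan start end_ window.reverse ((window.length : Int) - 1)

-- ===== PRECONDITION & SPEC =====
def Spec_find_chunk_end_boundary (text : String) (start : Int) (end_ : Int) (out : Int) : Prop := out = find_chunk_end_boundary_alt text start end_
instance (text : String) (start : Int) (end_ : Int) (out : Int) : Decidable (Spec_find_chunk_end_boundary text start end_ out) := by unfold Spec_find_chunk_end_boundary; infer_instance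

-- ===== CLAIM (what is proved, stated in full; the proofs are below) =====
def Claim_equal_find_chunk_end_boundary : Prop := ∀ (text : String) (start : Int) (end_ : Int), Dom_find_chunk_end_boundary text start end_ → Spec_find_chunk_end_boundary text start end_ (find_chunk_end_boundary text start end_)

-- ===== LEMMAS AND PROOFS =====

-- rightmost index of a character satisfying p (or -1): the common characterisation of both sides
def lastIdxP (p : Char → Bool) : List Char → Int
  | [] => -1
  | a :: t =>
      let r := lastIdxP p t
      if r = -1 then (if p a then 0 else -1) else r + 1

theorem neg_one_le_lastIdxP (p : Char → Bool) (w : List Char) : -1 ≤ lastIdxP p w := by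
  induction w with
  | nil => simp [lastIdxP]
  | cons a t ih => simp only [lastIdxP]; split_ifs <;> omega

theorem lastIdxP_append_singleton (p : Char → Bool) (ys : List Char) (a : Char) :
    lastIdxP p (ys ++ [a]) = if p a then (ys.length : Int) else lastIdxP p ys := by
  induction ys with
  | nil => simp [lastIdxP]
  | cons b ys ih =>
      have hb := neg_one_le_lastIdxP p ys
      simp only [List.cons_append, lastIdxP, ih, List.length_cons]
      split_ifs
      all_goals try contradiction
      all_goals try push_cast
      all_goals omega

theorem lastIdxP_or (p q : Char → Bool) (w : List Char) :
    lastIdxP (fun a => p a || q a) w =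
      if lastIdxP q w > lastIdxP p w then lastIdxP q w else lastIdxP p w := by
  induction w with
  | nil => simp [lastIdxP]
  | cons a t ih =>
      have hp := neg_one_le_lastIdxP p t
      have hq := neg_one_le_lastIdxP q t
      simp only [lastIdxP, ih]
      split_ifs <;> simp_all <;> omega

theorem isPrefixOf_singleton_cons (c a : Char) (t : List Char) :
    ([c].isPrefixOf (a :: t)) = (c == a) := by
  simp [List.isPrefixOf]

theorem rfind_go_singleton (w : List Char) (c : Char) :
    ∀ n, PySem.Chars.rfind.go w [c] n = lastIdxP (fun a => c == a) (w.take (n + 1)) := by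
  intro n
  induction n with
  | zero =>
      cases w with
      | nil => simp [PySem.Chars.rfind.go, lastIdxP, List.isPrefixOf]
      | cons a t =>
          rw [PySem.Chars.rfind.go, isPrefixOf_singleton_cons]
          simp only [List.take_add_one, List.take_zero, List.nil_append, List.getElem?_cons_zero,
            Option.toList_some, lastIdxP]
          split_ifs <;> simp_all
  | succ n ih =>
      by_cases h : n + 1 < w.length
      · have hget : w.drop (n + 1) = w[n + 1] :: w.drop (n + 2) := List.drop_eq_getElem_cons h
        have htake : w.take (n + 1 + 1) = w.take (n + 1) ++ [w[n + 1]] := by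
          rw [List.take_add_one]
          simp [List.getElem?_eq_getElem h]
        rw [htake, lastIdxP_append_singleton]
        have hlen : ((w.take (n + 1)).length : Int) = (n + 1 : Int) := by
          simp [List.length_take, Nat.min_eq_left (Nat.le_of_lt h)]
        rw [PySem.Chars.rfind.go, hget, isPrefixOf_singleton_cons, ih]
        split_ifs <;> simp_all
      · have hd : w.drop (n + 1) = [] := List.drop_eq_nil_of_le (by omega)
        have ht : w.take (n + 1 + 1) = w.take (n + 1) := by
          rw [List.take_of_length_le (by omega), List.take_of_length_le (by omega)]
        rw [PySem.Chars.rfind.go, hd, ht, ih]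
        simp [List.isPrefixOf]

theorem rfind_singleton (w : List Char) (c : Char) :
    PySem.Chars.rfind w [c] = lastIdxP (fun a => c == a) w := by
  rw [PySem.Chars.rfind, rfind_go_singleton, List.take_of_length_le (by omega)]

def pAll : Char → Bool := fun a =>
  ((((((('\n' == a || '.' == a) || ',' == a) || '!' == a) || '?' == a) || ';' == a) || ':' == a) || ' ' == a)

theorem contains_eq_pAll : ∀ a, PySem.Set.contains pvBoundarySet a = pAll a := by
  intro a
  have h : pvBoundarySet = ['\n', '.', ',', '!', '?', ';', ':', ' '] := by decide
  rw [Bool.eq_iff_iff]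
  simp [h, PySem.Set.contains, pAll]
  simp only [@eq_comm Char a]
  tauto

theorem lastIdxP_neg_one_base (p : Char → Bool) (w : List Char) :
    (if lastIdxP p w > -1 then lastIdxP p w else (-1 : Int)) = lastIdxP p w := by
  have := neg_one_le_lastIdxP p w
  split_ifs <;> omega

theorem bestA_eq (w : List Char) :
    ([['\n'], ['.'], [','], ['!'], ['?'], [';'], [':'], [' ']] : List (List Char)).foldl
      (fun best marker =>
        let pos := PySem.Chars.rfind w marker
        if pos > best then pos else best) (-1) = lastIdxP pAll w := by
  simp only [List.foldl, rfind_singleton, lastIdxP_neg_one_base, ← lastIdxP_or]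
  rfl

theorem scan_eq (start end_ : Int) (w : List Char) :
    fceb_scan start end_ w.reverse ((w.length : Int) - 1) =
      (if lastIdxP pAll w = -1 then end_
       else
         let adjusted_end := start + lastIdxP pAll w + 1
         if adjusted_end - start < 100 then end_ else adjusted_end) := by
  induction w using List.reverseRecOn with
  | nil => simp [fceb_scan, lastIdxP]
  | append_singleton ys a ih =>
      rw [List.reverse_append, List.reverse_singleton, List.singleton_append,
        lastIdxP_append_singleton]
      have h1 : ((ys ++ [a]).length : Int) - 1 = (ys.length : Int) := by
        simp [List.length_append]
      rw [h1]
      simp only [fceb_scan, contains_eq_pAll]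
      cases hpa : pAll a with
      | true =>
          have hne : ((ys.length : Int)) ≠ -1 := by omega
          simp [hne]
      | false => simpa using ih

-- ===== VERDICT (by name: the statement is the Claim_ definition above) =====
theorem find_chunk_end_boundary_spec : Claim_equal_find_chunk_end_boundary := by
  intro text start end_ _
  unfold Spec_find_chunk_end_boundary
  simp only [find_chunk_end_boundary, find_chunk_end_boundary_alt, scan_eq, bestA_eq]
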